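-- pv_equiv track=rewrite | github.com/doggydeok2/Problem-Solving | BOJ/1072 게임.py | more_tries
-- ===== SOURCE A (Python) =====
-- def more_tries(_x, _y):
--     _Z = 100 * _y // _x
--     if _Z >= 99:
--         return -1
--     _l, _r = 0, _x * 2
--     _ables = _r
--     while _l <= _r:
--         _mid = (_l + _r) // 2
--         if _Z + 1 <= 100 * (_y + _mid) // (_x + _mid):
--             _ables = min(_ables, _mid)
--             _r = _mid - 1
--         else:
--             _l = _mid + 1
--     return _ables
-- ===== SOURCE B (Python) =====
-- def more_tries(_x, _y):
--     _Z = 100 * _y // _x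
--     if _Z >= 99:
--         return -1
--     # smallest m >= 0 with 100*(_y+m) // (_x+m) > _Z; the condition is
--     # equivalent to m*(99-_Z) >= (_Z+1)*_x - 100*_y, so solve it directly
--     # by a ceiling division and clamp at 0.
--     need = (_Z + 1) * _x - 100 * _y
--     step = 99 - _Z
--     m = -((-need) // step)
--     return m if m > 0 else 0
-- ===== Notes on version B (the rewrite author's own statement) =====
-- stated objective: faster
-- what changed: B replaces the binary search over [0, 2x] with a direct closed-form ceiling division computing the minimal number of extra wins in O(1); Pre_ restricts to the natural domain 0 < x (games played): A raises ZeroDivisionError at x = 0, and a negative game count is outside the function's meaning.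
-- outside the precondition, e.g. on more_tries(-4, 1): A returns -8, B returns 0; on more_tries(0, 0): A raises ZeroDivisionError, B raises ZeroDivisionError
import Mathlib
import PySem

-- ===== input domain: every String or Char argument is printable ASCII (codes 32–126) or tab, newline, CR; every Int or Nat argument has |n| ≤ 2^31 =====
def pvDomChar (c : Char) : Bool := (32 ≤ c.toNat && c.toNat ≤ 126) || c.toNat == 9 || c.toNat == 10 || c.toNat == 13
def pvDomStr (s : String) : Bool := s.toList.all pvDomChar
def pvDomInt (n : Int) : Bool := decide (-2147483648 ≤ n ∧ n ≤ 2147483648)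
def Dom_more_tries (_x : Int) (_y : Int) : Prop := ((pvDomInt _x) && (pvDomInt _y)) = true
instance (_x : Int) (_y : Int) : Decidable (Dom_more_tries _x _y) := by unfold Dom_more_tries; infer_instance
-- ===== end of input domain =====

-- B replaces A's binary search over [0, 2x] by a closed-form ceiling division (O(1) search step).

-- ===== PORT A =====
-- the while-loop of A, state (_l, _r, _ables)
def moreLoop (_Z _x _y : Int) (l r ables : Int) : Int :=
  if h : l ≤ r then
    let mid := PySem.Int.floordiv (l + r) 2
    if _Z + 1 ≤ PySem.Int.floordiv (100 * (_y + mid)) (_x + mid) then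
      moreLoop _Z _x _y l (mid - 1) (min ables mid)
    else
      moreLoop _Z _x _y (mid + 1) r ables
  else ables
termination_by (r - l + 1).toNat
decreasing_by
  · have hb := PySem.Int.floordiv_two_mid_bounds h; omega
  · have hb := PySem.Int.floordiv_two_mid_bounds h; omega

def more_tries (_x : Int) (_y : Int) : Int :=
  let _Z := PySem.Int.floordiv (100 * _y) _x
  if _Z ≥ 99 then -1
  else moreLoop _Z _x _y 0 (_x * 2) (_x * 2)

-- ===== PORT B =====
def more_tries_alt (_x : Int) (_y : Int) : Int :=
  let _Z := PySem.Int.floordiv (100 * _y) _x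
  if _Z ≥ 99 then -1
  else
    let need := (_Z + 1) * _x - 100 * _y
    let step := 99 - _Z
    let m := -(PySem.Int.floordiv (-need) step)
    if m > 0 then m else 0

-- ===== PRECONDITION & SPEC =====
-- Pre_ restricts to the natural domain 0 < _x (a count of games played): at _x = 0 the Python A
-- raises ZeroDivisionError, and a negative game count is outside the function's meaning.
def Pre_more_tries (_x : Int) (_y : Int) : Prop := 0 < _x
instance (_x : Int) (_y : Int) : Decidable (Pre_more_tries _x _y) := by unfold Pre_more_tries; infer_instance
def pvWitness_more_tries : Int × Int := (2, 1)

def Spec_more_tries (_x : Int) (_y : Int) (out : Int) : Prop := out = more_tries_alt _x _y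
instance (_x : Int) (_y : Int) (out : Int) : Decidable (Spec_more_tries _x _y out) := by unfold Spec_more_tries; infer_instance

-- ===== CLAIM (what is proved, stated in full; the proofs are below) =====
def Claim_equal_more_tries : Prop := ∀ (_x : Int) (_y : Int), Dom_more_tries _x _y → Pre_more_tries _x _y → Spec_more_tries _x _y (more_tries _x _y)

-- ===== LEMMAS AND PROOFS =====

-- Characterization of the binary search: if on the whole interval [l, r] the loop's test
-- holds exactly for mid ≥ m0, the loop returns min ables (max l m0) when that value is ≤ r,
-- and ables otherwise.
lemma moreLoop_char (_Z _x _y m0 : Int) :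
    ∀ (n : Nat) (l r ables : Int), (r - l + 1).toNat ≤ n →
      (∀ mid, l ≤ mid → mid ≤ r →
        (_Z + 1 ≤ PySem.Int.floordiv (100 * (_y + mid)) (_x + mid) ↔ m0 ≤ mid)) →
      moreLoop _Z _x _y l r ables =
        if max l m0 ≤ r then min ables (max l m0) else ables := by
  intro n
  induction n with
  | zero =>
      intro l r ables hn hiff
      rw [moreLoop, dif_neg (by omega), if_neg (by omega)]
  | succ n ih =>
      intro l r ables hn hiff
      rw [moreLoop]
      by_cases h : l ≤ r
      · rw [dif_pos h]
        have hb := PySem.Int.floordiv_two_mid_bounds h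
        set mid := PySem.Int.floordiv (l + r) 2 with hmid
        by_cases hc : _Z + 1 ≤ PySem.Int.floordiv (100 * (_y + mid)) (_x + mid)
        · rw [if_pos hc]
          have hm0 : m0 ≤ mid := (hiff mid hb.1 hb.2).1 hc
          rw [ih l (mid - 1) (min ables mid) (by omega)
            (fun m hl hr => hiff m hl (by omega))]
          by_cases hcase : max l m0 ≤ mid - 1
          · rw [if_pos hcase, if_pos (by omega)]; omega
          · rw [if_neg hcase, if_pos (by omega)]; omega
        · rw [if_neg hc]
          have hm0 : mid < m0 := by
            by_contra hcon
            exact hc ((hiff mid hb.1 hb.2).2 (by omega))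
          rw [ih (mid + 1) r ables (by omega)
            (fun m hl hr => hiff m (by omega) hr)]
          have hmax : max (mid + 1) m0 = max l m0 := by omega
          rw [hmax]
      · rw [dif_neg h, if_neg (by omega)]

-- With _x > 0 and mid ≥ 0, the loop's test is the linear inequality B's closed form solves.
lemma test_iff (_Z _x _y mid : Int) (hx : 0 < _x) (hm : 0 ≤ mid) :
    (_Z + 1 ≤ PySem.Int.floordiv (100 * (_y + mid)) (_x + mid)) ↔
      (_Z + 1) * _x - 100 * _y ≤ mid * (99 - _Z) := by
  rw [PySem.Int.le_floordiv_iff_mul_le (by omega)]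
  constructor <;> intro h <;> nlinarith [h]

-- The ceiling division -((-a) // b) is the least q with a ≤ q * b (for b > 0).
lemma ceil_le_iff (a b q : Int) (hb : 0 < b) :
    -(PySem.Int.floordiv (-a) b) ≤ q ↔ a ≤ q * b := by
  have h := PySem.Int.le_floordiv_iff_mul_le (a := -a) (b := b) (q := -q) hb
  constructor
  · intro hq
    have := h.2
    nlinarith [h.1 (by omega)]
  · intro hq
    have : -q * b ≤ -a := by nlinarith
    have := h.2 this
    omega

-- ===== VERDICT (by name: the statement is the Claim_ definition above) =====
theorem more_tries_spec : Claim_equal_more_tries := by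
  intro _x _y _hdom hpre
  unfold Pre_more_tries at hpre
  unfold Spec_more_tries more_tries more_tries_alt
  dsimp only
  set _Z := PySem.Int.floordiv (100 * _y) _x with hZ
  by_cases hz : _Z ≥ 99
  · simp [hz]
  · rw [if_neg hz, if_neg hz]
    have hxpos : 0 < _x := hpre
    set need := (_Z + 1) * _x - 100 * _y with hneed
    set step := 99 - _Z with hstep
    have hsteppos : 0 < step := by omega
    set m := -(PySem.Int.floordiv (-need) step) with hm
    set m0 : Int := max 0 m with hm0
    -- the loop test on [0, 2x] is exactly "mid ≥ m0"
    have hiff : ∀ mid, (0:Int) ≤ mid → mid ≤ _x * 2 →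
        (_Z + 1 ≤ PySem.Int.floordiv (100 * (_y + mid)) (_x + mid) ↔ m0 ≤ mid) := by
      intro mid hl hr
      rw [test_iff _Z _x _y mid hxpos hl, ← hneed, ← hstep,
        ← ceil_le_iff need step mid hsteppos, ← hm, hm0, max_le_iff]
      tauto
    -- the threshold lies in [0, 2x]: the test holds at mid = 2x
    have hmod := PySem.Int.floordiv_mul_add_mod (100 * _y) _x
    have hmodnn := PySem.Int.mod_nonneg (100 * _y) hxpos
    have hneed_le : need ≤ _x * 2 * step := by nlinarith
    have hm_le : m ≤ _x * 2 := (ceil_le_iff need step (_x * 2) hsteppos).2 hneed_le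
    have hchar := moreLoop_char _Z _x _y m0 (_x * 2 + 1).toNat 0 (_x * 2) (_x * 2)
      (by omega) hiff
    rw [hchar, if_pos (by omega)]
    omega
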